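-- pv_equiv track=rewrite | github.com/Sanchit028/Coding-Ninja-Problem-of-the-day | Easy/26 Jan 2024.py | termsOfAP
-- ===== SOURCE A (Python) =====
-- def termsOfAP(x):
--     res=[]
--     i=0
--     while(i<x):
--         a=3*(i+1)+2
--         if a%4 == 0:
--             x=x+1
--         else:
--             res.append(a)
--         i+=1
--     return res
--     pass
-- ===== SOURCE B (Python) =====
-- def termsOfAP(x):
--     # j-th output's AP index i skips i % 4 == 1: three accepted i per block of 4.
--     return [3 * (4 * (j // 3) + (0, 2, 3)[j % 3]) + 5 for j in range(x)]
-- ===== Notes on version B (the rewrite author's own statement) =====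
-- stated objective: simpler
-- what changed: A's while loop that conditionally extends its own bound x on every skipped term (a % 4 == 0) is replaced by a single comprehension over range(x) that computes the j-th accepted AP index in closed form via block-of-3 divmod arithmetic, so no skipping or bound mutation happens at all.
import Mathlib
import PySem

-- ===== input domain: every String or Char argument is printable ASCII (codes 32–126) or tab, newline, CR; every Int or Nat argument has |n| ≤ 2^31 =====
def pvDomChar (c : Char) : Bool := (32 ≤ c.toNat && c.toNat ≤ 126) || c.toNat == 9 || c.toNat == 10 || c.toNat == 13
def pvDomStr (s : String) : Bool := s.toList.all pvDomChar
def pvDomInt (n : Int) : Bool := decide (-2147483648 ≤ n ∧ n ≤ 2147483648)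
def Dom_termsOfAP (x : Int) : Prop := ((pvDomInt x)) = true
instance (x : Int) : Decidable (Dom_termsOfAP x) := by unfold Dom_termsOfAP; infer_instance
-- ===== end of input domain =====

-- B replaces A's skip-and-extend while loop by a closed-form index map per output position (objective: simpler).

-- ===== PORT A =====
-- A's while loop: i counts up, x is extended by one on every skipped term (a % 4 == 0).
-- The fuel parameter is only a totality guard: 2*x.toNat + 1 steps always suffice
-- (proved in loop_eq below); the loop body is A's, step for step.
def termsOfAPLoop : Nat → Int → Int → List Int → List Int
  | 0, _, _, res => res
  | fuel + 1, i, x, res =>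
    if i < x then
      if PySem.Int.mod (3 * (i + 1) + 2) 4 = 0 then
        termsOfAPLoop fuel (i + 1) (x + 1) res
      else
        termsOfAPLoop fuel (i + 1) x (res ++ [3 * (i + 1) + 2])
    else res

def termsOfAP (x : Int) : List Int := termsOfAPLoop (2 * x.toNat + 1) 0 x []

-- ===== PORT B =====
-- (0, 2, 3)[r] for r = j % 3
def tupB (r : Int) : Int := if r = 0 then 0 else if r = 1 then 2 else 3

def termsOfAP_alt (x : Int) : List Int :=
  (PySem.List.pyRange 0 x 1).map
    (fun j => 3 * (4 * PySem.Int.floordiv j 3 + tupB (PySem.Int.mod j 3)) + 5)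

-- ===== PRECONDITION & SPEC =====
def Spec_termsOfAP (x : Int) (out : List Int) : Prop := out = termsOfAP_alt x
instance (x : Int) (out : List Int) : Decidable (Spec_termsOfAP x out) := by unfold Spec_termsOfAP; infer_instance

-- ===== CLAIM (what is proved, stated in full; the proofs are below) =====
def Claim_equal_termsOfAP : Prop := ∀ (x : Int), Dom_termsOfAP x → Spec_termsOfAP x (termsOfAP x)

-- ===== LEMMAS AND PROOFS =====

-- The next n accepted terms (indices i with i % 4 ≠ 1 give term 3*i+5), starting at index i.
def accFrom (i : Int) (n : Nat) : List Int :=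
  if hn : n = 0 then []
  else if hi : i % 4 = 1 then accFrom (i + 1) n
  else (3 * i + 5) :: accFrom (i + 1) (n - 1)
termination_by 2 * n + (if i % 4 = 1 then 1 else 0)
decreasing_by
  · split_ifs <;> omega
  · split_ifs <;> omega

lemma accFrom_zero (i : Int) : accFrom i 0 = [] := by rw [accFrom]; simp

lemma accFrom_skip (i : Int) (n : Nat) (h : i % 4 = 1) : accFrom i n = accFrom (i + 1) n := by
  rcases Nat.eq_zero_or_pos n with h0 | h0
  · subst h0; rw [accFrom_zero, accFrom_zero]
  · rw [accFrom]; simp [Nat.pos_iff_ne_zero.mp h0, h]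

lemma accFrom_accept (i : Int) (n : Nat) (h : i % 4 ≠ 1) :
    accFrom i (n + 1) = (3 * i + 5) :: accFrom (i + 1) n := by
  rw [accFrom]; simp [h]

-- With enough fuel, A's loop appends exactly the next (x - i).toNat accepted terms.
lemma loop_eq (fuel : Nat) : ∀ (i x : Int) (res : List Int),
    2 * (x - i).toNat + (if i % 4 = 1 then 1 else 0) ≤ fuel →
    termsOfAPLoop fuel i x res = res ++ accFrom i (x - i).toNat := by
  induction fuel with
  | zero =>
    intro i x res h
    have hk : (x - i).toNat = 0 := by split_ifs at h <;> omega
    rw [hk, accFrom_zero, List.append_nil, termsOfAPLoop]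
  | succ fuel ih =>
    intro i x res h
    rw [termsOfAPLoop]
    by_cases hix : i < x
    · simp only [hix, if_pos]
      by_cases hm : PySem.Int.mod (3 * (i + 1) + 2) 4 = 0
      · simp only [hm, if_pos]
        have hm4 : i % 4 = 1 := by
          rw [PySem.Int.mod_eq_emod_of_pos (show (0:Int) < 4 by omega)] at hm
          omega
        rw [ih (i + 1) (x + 1) res (by split_ifs at h ⊢ <;> omega)]
        have he : (x + 1 - (i + 1)).toNat = (x - i).toNat := by omega
        rw [he, ← accFrom_skip i _ hm4]
      · simp only [hm, if_neg, not_false_iff]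
        have hm4 : i % 4 ≠ 1 := by
          rw [PySem.Int.mod_eq_emod_of_pos (show (0:Int) < 4 by omega)] at hm
          omega
        rw [ih (i + 1) x (res ++ [3 * (i + 1) + 2]) (by split_ifs at h ⊢ <;> omega)]
        have he : (x - i).toNat = (x - (i + 1)).toNat + 1 := by omega
        rw [he, accFrom_accept i _ hm4]
        have h35 : 3 * (i + 1) + 2 = 3 * i + 5 := by ring
        rw [h35, List.append_assoc]
        rfl
    · simp only [hix, if_neg, not_false_iff]
      have hk : (x - i).toNat = 0 := by omega
      rw [hk, accFrom_zero, List.append_nil]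

-- index of the j-th accepted term
def idxB (j : Int) : Int := 4 * (j / 3) + tupB (j % 3)

lemma idxB_mod (j : Int) : idxB j % 4 ≠ 1 := by
  have h3 : j % 3 = 0 ∨ j % 3 = 1 ∨ j % 3 = 2 := by omega
  rcases h3 with h | h | h
  · simp [idxB, tupB, h]
  · simp [idxB, tupB, h]
  · simp [idxB, tupB, h]

lemma idxB_succ (j : Int) (n : Nat) : accFrom (idxB j + 1) n = accFrom (idxB (j + 1)) n := by
  have h3 : j % 3 = 0 ∨ j % 3 = 1 ∨ j % 3 = 2 := by omega
  rcases h3 with h | h | h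
  · have h1 : (j + 1) % 3 = 1 := by omega
    have h2 : (j + 1) / 3 = j / 3 := by omega
    have hs : (idxB j + 1) % 4 = 1 := by simp [idxB, tupB, h]
    rw [accFrom_skip _ _ hs]
    have : idxB j + 1 + 1 = idxB (j + 1) := by simp [idxB, tupB, h, h1, h2]; omega
    rw [this]
  · have h1 : (j + 1) % 3 = 2 := by omega
    have h2 : (j + 1) / 3 = j / 3 := by omega
    have : idxB j + 1 = idxB (j + 1) := by simp [idxB, tupB, h, h1, h2]; ring
    rw [this]
  · have h1 : (j + 1) % 3 = 0 := by omega
    have h2 : (j + 1) / 3 = j / 3 + 1 := by omega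
    have : idxB j + 1 = idxB (j + 1) := by simp [idxB, tupB, h, h1, h2]; ring
    rw [this]

lemma accFrom_eq_map (n : Nat) : ∀ (j : Int), 0 ≤ j →
    accFrom (idxB j) n =
      (PySem.List.pyRange j (j + n) 1).map
        (fun j => 3 * (4 * PySem.Int.floordiv j 3 + tupB (PySem.Int.mod j 3)) + 5) := by
  induction n with
  | zero =>
    intro j _
    rw [accFrom_zero, PySem.List.pyRange_one_eq_nil (by omega), List.map_nil]
  | succ n ih =>
    intro j hj
    rw [PySem.List.pyRange_one_cons (by omega), List.map_cons]
    rw [accFrom_accept _ _ (idxB_mod j), idxB_succ]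
    have hf : PySem.Int.floordiv j 3 = j / 3 :=
      PySem.Int.floordiv_eq_ediv_of_pos (by omega)
    have hm : PySem.Int.mod j 3 = j % 3 :=
      PySem.Int.mod_eq_emod_of_pos (by omega)
    have hval : 3 * (4 * PySem.Int.floordiv j 3 + tupB (PySem.Int.mod j 3)) + 5 = 3 * idxB j + 5 := by
      rw [hf, hm]; simp [idxB]
    rw [hval]
    rw [show (j + (↑(n + 1) : Int)) = (j + 1) + ↑n by push_cast; ring]
    rw [ih (j + 1) (by omega)]

lemma idxB_zero : idxB 0 = 0 := by simp [idxB, tupB]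

-- ===== VERDICT (by name: the statement is the Claim_ definition above) =====
theorem termsOfAP_spec : Claim_equal_termsOfAP := by
  intro x _
  show termsOfAP x = termsOfAP_alt x
  rw [termsOfAP, loop_eq (2 * x.toNat + 1) 0 x [] (by split_ifs <;> omega), List.nil_append]
  by_cases hx : x ≤ 0
  · have : (x - 0).toNat = 0 := by omega
    rw [this, accFrom_zero, termsOfAP_alt,
      PySem.List.pyRange_one_eq_nil (by omega), List.map_nil]
  · have h0 : x - 0 = x := by ring
    rw [h0, termsOfAP_alt]
    have h := accFrom_eq_map x.toNat 0 (le_refl 0)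
    rw [idxB_zero] at h
    rw [show (0 : Int) + (x.toNat : Int) = x by omega] at h
    exact h
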